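-- pv_equiv track=rewrite | github.com/itsarvindhere/Sliding-Window | 010. Substrings of Size 3 with Distinct Characters/Substrings.py | countGoodSubstrings
-- ===== SOURCE A (Python) =====
-- def countGoodSubstrings(s):
--
-- 	#To keep track of count of good substrings
--     count = 0
--
-- 	#Dictionary to keep the count of each character in a substring
--     dict = {}
--
-- 	#This variable keeps track of how many unique characters are there in current substring
--     uniques = 0
--
--     i,j = 0,0
--     n = len(s)
--
--     while(j < n):
--
--         c = s[j]
-- 		#If jth character is not in dictionary, that means not only we can add it, but that also means it is currently a unique character in substring
--         if not c in dict:
--             dict[c] = 1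
--             uniques += 1
--         else:
--             dict[c] += 1
--
-- 		#If window length is not yet 3, increment j
--         if(j - i + 1 < 3): j += 1
-- 		#If window size is 3 that means we found a substring of length 3
--         else:
-- 			#To check if it is a good substring, just check if number of unique characters is 3 or not
--             if(uniques == 3): count += 1
--
-- 			#Now, just before sliding the window to right, reduce the count of ith character from map
--             dict[s[i]] -= 1
--
-- 			#If count becomes 0, that means we also need to reduce count of uniques and remove this key from dictionary
--             if(dict[s[i]] == 0):
--                 dict.pop(s[i])
--                 uniques -= 1
--
-- 			# Slide the window
--             i += 1
--             j += 1
--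
--     return count
-- ===== SOURCE B (Python) =====
-- def countGoodSubstrings(s):
--     n = len(s)
--     count = 0
--     for i in range(n - 2):
--         if s[i] != s[i + 1] and s[i + 1] != s[i + 2] and s[i] != s[i + 2]:
--             count += 1
--     return count
-- ===== Notes on version B (the rewrite author's own statement) =====
-- stated objective: simpler
-- what changed: Replaced the sliding window with its running character-count dictionary and uniques counter by a direct scan that tests each index triple s[i],s[i+1],s[i+2] for pairwise distinctness independently, maintaining no state but the count.
import Mathlib
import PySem

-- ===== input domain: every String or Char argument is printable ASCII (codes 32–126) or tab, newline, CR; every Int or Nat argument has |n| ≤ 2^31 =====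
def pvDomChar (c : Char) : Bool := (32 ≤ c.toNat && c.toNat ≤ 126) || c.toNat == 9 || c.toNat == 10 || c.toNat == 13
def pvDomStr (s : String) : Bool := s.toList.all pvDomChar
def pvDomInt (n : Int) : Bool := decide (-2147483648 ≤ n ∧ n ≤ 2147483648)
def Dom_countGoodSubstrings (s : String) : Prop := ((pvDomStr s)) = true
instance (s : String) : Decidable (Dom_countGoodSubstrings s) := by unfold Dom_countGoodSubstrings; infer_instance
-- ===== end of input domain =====

-- B replaces A's sliding window with its running character-count dict and uniques counter
-- by a direct scan testing each triple s[i], s[i+1], s[i+2] for pairwise distinctness (objective: simpler).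

-- ===== PORT A =====
-- the while(j < n) loop of A; state: indices i, j, the count, the uniques counter and the char-count dict
def pvLoopA (cs : List Char) (n : Int) (i j count uniques : Int)
    (d : PySem.Dict Char Int) : Int :=
  if h : j < n then
    match PySem.List.pyGet? cs j with
    | none => count          -- unreachable (0 ≤ j < n = len cs); guard for totality only
    | some c =>
      let du : PySem.Dict Char Int × Int :=
        if d.contains c = false then (d.insert c 1, uniques + 1)
        else (d.modify c 0 (· + 1), uniques)
      if j - i + 1 < 3 then pvLoopA cs n i (j + 1) count du.2 du.1
      else
        let count' := if du.2 == 3 then count + 1 else count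
        match PySem.List.pyGet? cs i with
        | none => count'     -- unreachable (0 ≤ i < n); guard for totality only
        | some ci =>
          let d2 := du.1.modify ci 0 (· - 1)
          let du2 : PySem.Dict Char Int × Int :=
            if d2.getD ci 0 == 0 then (d2.erase ci, du.2 - 1) else (d2, du.2)
          pvLoopA cs n (i + 1) (j + 1) count' du2.2 du2.1
  else count
termination_by (n - j).toNat
decreasing_by all_goals omega

def countGoodSubstrings (s : String) : Int :=
  pvLoopA s.toList (s.toList.length : Int) 0 0 0 0 PySem.Dict.empty

-- ===== PORT B =====
def countGoodSubstrings_alt (s : String) : Int :=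
  let cs := s.toList
  let n : Int := (cs.length : Int)
  (PySem.List.pyRange 0 (n - 2) 1).foldl
    (fun count i =>
      if PySem.List.pyGetD cs i ' ' != PySem.List.pyGetD cs (i + 1) ' ' &&
         PySem.List.pyGetD cs (i + 1) ' ' != PySem.List.pyGetD cs (i + 2) ' ' &&
         PySem.List.pyGetD cs i ' ' != PySem.List.pyGetD cs (i + 2) ' '
      then count + 1 else count) 0

-- ===== PRECONDITION & SPEC =====
def Spec_countGoodSubstrings (s : String) (out : Int) : Prop := out = countGoodSubstrings_alt s
instance (s : String) (out : Int) : Decidable (Spec_countGoodSubstrings s out) := by unfold Spec_countGoodSubstrings; infer_instance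

-- ===== CLAIM (what is proved, stated in full; the proofs are below) =====
def Claim_equal_countGoodSubstrings : Prop := ∀ (s : String), Dom_countGoodSubstrings s → Spec_countGoodSubstrings s (countGoodSubstrings s)

-- ===== LEMMAS AND PROOFS =====

-- number of index triples (i, i+1, i+2) whose three characters are pairwise distinct
def pvTriples : List Char → Int
  | a :: b :: c :: rest => (if a != b && b != c && a != c then 1 else 0) + pvTriples (b :: c :: rest)
  | _ => 0

lemma pvTriples_short (cs : List Char) (h : cs.length ≤ 2) : pvTriples cs = 0 := by
  match cs, h with
  | [], _ => rfl
  | [_], _ => rfl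
  | [_, _], _ => rfl

lemma erase_get? (d : PySem.Dict Char Int) (k x : Char) :
    (d.erase k).get? x = if x = k then none else d.get? x := by
  simp only [PySem.Dict.erase, PySem.Dict.get?, List.find?_filter]
  by_cases hxk : x = k
  · subst hxk
    rw [if_pos rfl]
    rw [List.find?_eq_none.mpr ?_]
    · simp
    · intro p _
      by_cases h : p.1 = x <;> simp [h]
  · rw [if_neg hxk]
    have hfun : (fun p : Char × Int => decide ((!p.1 == k) = true ∧ (p.1 == x) = true))
        = (fun p : Char × Int => p.1 == x) := by
      funext p
      by_cases h : p.1 = x <;> by_cases h2 : p.1 = k <;> simp_all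
    rw [hfun]

lemma erase_getD (d : PySem.Dict Char Int) (k x : Char) :
    (d.erase k).getD x 0 = if x = k then 0 else d.getD x 0 := by
  simp only [PySem.Dict.getD, erase_get?]
  split <;> simp

lemma erase_contains (d : PySem.Dict Char Int) (k x : Char) :
    (d.erase k).contains x = (!(x == k) && d.contains x) := by
  simp only [PySem.Dict.erase, PySem.Dict.contains, List.any_filter]
  by_cases hxk : x = k
  · subst hxk
    simp only [beq_self_eq_true, Bool.not_true, Bool.false_and]
    rw [List.any_eq_false]
    intro p _
    by_cases h : p.1 = x <;> simp [h]
  · have hfun : (fun p : Char × Int => (!p.1 == k) && p.1 == x)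
        = (fun p : Char × Int => p.1 == x) := by
      funext p
      by_cases h : p.1 = x <;> by_cases h2 : p.1 = k <;> simp_all
    rw [hfun]
    have hf : (x == k) = false := by simp [hxk]
    rw [hf]
    simp

-- arithmetic facts about the distinct-count bookkeeping (chars a, b in window, c incoming)
lemma pvGood (a b c : Char) :
    (((if a = b then 0 else 1) + 1 + (if c = a ∨ c = b then 0 else 1) : Int) == 3)
      = (a != b && b != c && a != c) := by
  by_cases hab : a = b <;> by_cases hca : c = a <;> by_cases hcb : c = b <;>
    simp [hab, hca, hcb, bne_iff_ne] <;> simp_all [eq_comm]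

lemma pvSub (a b c : Char) (h1 : ¬a = b) (h2 : ¬a = c) :
    ((if a = b then 0 else 1) + 1 + (if c = a ∨ c = b then 0 else 1) : Int) - 1
      = (if b = c then 1 else 2) := by
  rw [if_neg h1]
  by_cases hbc : b = c
  · rw [if_pos (Or.inr hbc.symm), if_pos hbc]; norm_num
  · rw [if_neg (by rintro (h | h); exacts [h2 h.symm, hbc h.symm]), if_neg hbc]; norm_num

lemma pvKeep (a b c : Char) (h : a = b ∨ a = c) :
    ((if a = b then 0 else 1) + 1 + (if c = a ∨ c = b then 0 else 1) : Int)
      = (if b = c then 1 else 2) := by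
  rcases h with h | h
  · rw [if_pos h]
    by_cases hbc : b = c
    · rw [if_pos (Or.inr hbc.symm), if_pos hbc]; norm_num
    · rw [if_neg (by rintro (hh | hh); exacts [hbc (hh.trans h).symm, hbc hh.symm]), if_neg hbc]
      norm_num
  · rw [if_pos (Or.inl h.symm)]
    by_cases hab : a = b
    · rw [if_pos hab, if_pos (hab.symm.trans h)]; norm_num
    · rw [if_neg hab, if_neg (fun hh => hab (h.trans hh.symm))]; norm_num

lemma pvMem (a b c : Char) (hz : ¬ ((!(a == b) && !(a == c)) = true)) : a = b ∨ a = c := by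
  by_cases hab : a = b
  · exact Or.inl hab
  · by_cases hac : a = c
    · exact Or.inr hac
    · exact absurd (by simp [beq_eq_false_iff_ne.mpr hab, beq_eq_false_iff_ne.mpr hac]) hz

lemma pvZero (a b c : Char) :
    ((((if a = b then 1 else 0) + (if a = c then 1 else 0) : Int)) == 0)
      = (!(a == b) && !(a == c)) := by
  by_cases hab : a = b <;> by_cases hac : a = c
  · rw [if_pos hab, if_pos hac, beq_iff_eq.mpr hab, beq_iff_eq.mpr hac]; decide
  · rw [if_pos hab, if_neg hac, beq_iff_eq.mpr hab, beq_eq_false_iff_ne.mpr hac]; decide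
  · rw [if_neg hab, if_pos hac, beq_eq_false_iff_ne.mpr hab, beq_iff_eq.mpr hac]; decide
  · rw [if_neg hab, if_neg hac, beq_eq_false_iff_ne.mpr hab, beq_eq_false_iff_ne.mpr hac]; decide

-- the steady state of A's window: window is [a, b] at positions i = |pre|, i+1; j = i + 2
lemma pvLoopA_steady : ∀ (rest pre : List Char) (a b : Char) (count u : Int)
    (d : PySem.Dict Char Int) (i j n : Int),
    i = (pre.length : Int) → j = i + 2 → n = ((pre ++ a :: b :: rest).length : Int) →
    (∀ x, d.getD x 0 = ((if x = a then 1 else 0) + (if x = b then 1 else 0) : Int)) →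
    (∀ x, d.contains x = (x == a || x == b)) →
    u = (if a = b then 1 else 2) →
    pvLoopA (pre ++ a :: b :: rest) n i j count u d = count + pvTriples (a :: b :: rest) := by
  intro rest
  induction rest with
  | nil =>
    intro pre a b count u d i j n hi hj hn _ _ _
    subst hi hj hn
    rw [pvLoopA]
    rw [dif_neg (by simp)]
    simp [pvTriples]
  | cons c rest' ih =>
    intro pre a b count u d i j n hi hj hn hget hcont hu
    subst hi hj hn
    rw [pvLoopA]
    rw [dif_pos (by simp; omega)]
    -- s[j] = c
    have hgetj : PySem.List.pyGet? (pre ++ a :: b :: c :: rest') ((pre.length : Int) + 2)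
        = some c := by
      have harr : pre ++ a :: b :: c :: rest' = (pre ++ [a, b]) ++ c :: rest' := by simp
      rw [harr]
      have hp := PySem.List.pyGet?_append_length (pre ++ [a, b]) rest' c
      simpa using hp
    rw [hgetj]
    simp only []
    rw [if_neg (by omega : ¬ ((pre.length : Int) + 2 - (pre.length : Int) + 1 < 3))]
    -- s[i] = a
    rw [PySem.List.pyGet?_append_length pre _ a]
    simp only []
    -- the state (du.1, du.2) after adding c: counts of [a,b,c] and its distinct count
    set du : PySem.Dict Char Int × Int :=
      if d.contains c = false then (d.insert c 1, u + 1)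
      else (d.modify c 0 (· + 1), u) with hdu
    have hget' : ∀ x, du.1.getD x 0 =
        ((if x = a then 1 else 0) + (if x = b then 1 else 0) + (if x = c then 1 else 0) : Int) := by
      intro x
      by_cases hc : d.contains c = false
      · have h2 : (c == a || c == b) = false := by rw [← hcont c]; exact hc
        simp only [Bool.or_eq_false_iff, beq_eq_false_iff_ne, ne_eq] at h2
        rw [hdu, if_pos hc]
        simp only []
        rw [PySem.Dict.getD_insert, hget x]
        by_cases hxc : x = c
        · subst hxc; simp [h2.1, h2.2]
        · simp [hxc]
      · rw [hdu, if_neg hc]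
        simp only []
        rw [PySem.Dict.getD_modify, hget c, hget x]
        by_cases hxc : x = c
        · subst hxc; simp
        · simp [hxc]
    have hcont' : ∀ x, du.1.contains x = (x == a || x == b || x == c) := by
      intro x
      by_cases hc : d.contains c = false
      · rw [hdu, if_pos hc]
        simp only []
        rw [PySem.Dict.contains_insert, hcont x]
        cases h1 : (x == a) <;> cases h2 : (x == b) <;> cases h3 : (x == c) <;> simp [h1, h2, h3]
      · rw [hdu, if_neg hc]
        simp only []
        rw [PySem.Dict.contains_modify, hcont x]
        cases h1 : (x == a) <;> cases h2 : (x == b) <;> cases h3 : (x == c) <;> simp [h1, h2, h3]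
    have hu' : du.2 = ((if a = b then 0 else 1) + 1 + (if c = a ∨ c = b then 0 else 1) : Int) := by
      by_cases hc : d.contains c = false
      · have h2 : (c == a || c == b) = false := by rw [← hcont c]; exact hc
        simp only [Bool.or_eq_false_iff, beq_eq_false_iff_ne, ne_eq] at h2
        rw [hdu, if_pos hc]
        simp only []
        have hnc : ¬ (c = a ∨ c = b) := by tauto
        rw [hu, if_neg hnc]
        split_ifs <;> ring
      · have h2 : (c == a || c == b) = true := by
          rw [← hcont c]; revert hc; cases d.contains c <;> simp
        simp only [Bool.or_eq_true, beq_iff_eq] at h2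
        rw [hdu, if_neg hc]
        simp only []
        rw [hu, if_pos h2]
        split_ifs <;> ring
    -- the good-triple check: uniques == 3 iff a, b, c pairwise distinct
    have hgood : (du.2 == 3) = (a != b && b != c && a != c) := by
      rw [hu']; exact pvGood a b c
    -- the state after decrementing a
    set d2 := du.1.modify a 0 (· - 1) with hd2
    have hget2 : ∀ x, d2.getD x 0 =
        ((if x = b then 1 else 0) + (if x = c then 1 else 0) : Int) := by
      intro x
      rw [hd2, PySem.Dict.getD_modify, hget' a, hget' x]
      by_cases hxa : x = a
      · subst hxa; simp; try ring
      · simp [hxa]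
    have hcont2 : ∀ x, d2.contains x = (x == a || x == b || x == c) := by
      intro x
      rw [hd2, PySem.Dict.contains_modify, hcont' x]
      cases h1 : (x == a) <;> simp [h1]
    set du2 : PySem.Dict Char Int × Int :=
      if d2.getD a 0 == 0 then (d2.erase a, du.2 - 1) else (d2, du.2) with hdu2
    have hzero : (d2.getD a 0 == 0) = (!(a == b) && !(a == c)) := by
      rw [hget2 a]
      exact pvZero a b c
    have hget2' : ∀ x, du2.1.getD x 0 =
        ((if x = b then 1 else 0) + (if x = c then 1 else 0) : Int) := by
      intro x
      by_cases hz : (d2.getD a 0 == 0) = true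
      · rw [hdu2, if_pos hz]
        simp only []
        rw [hzero] at hz
        simp only [Bool.and_eq_true, Bool.not_eq_true', beq_eq_false_iff_ne, ne_eq] at hz
        rw [erase_getD, hget2 x]
        by_cases hxa : x = a
        · subst hxa; simp [hz.1, hz.2]
        · simp [hxa]
      · rw [hdu2, if_neg hz]
        simp only []
        exact hget2 x
    have hcont2' : ∀ x, du2.1.contains x = (x == b || x == c) := by
      intro x
      by_cases hz : (d2.getD a 0 == 0) = true
      · rw [hdu2, if_pos hz]
        simp only []
        rw [hzero] at hz
        simp only [Bool.and_eq_true, Bool.not_eq_true', beq_eq_false_iff_ne, ne_eq] at hz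
        rw [erase_contains, hcont2 x]
        by_cases hxa : x = a
        · subst hxa
          simp [beq_iff_eq, hz.1, hz.2]
        · have hf : (x == a) = false := by simp [beq_iff_eq, hxa]
          simp [hf]
      · rw [hdu2, if_neg hz]
        simp only []
        rw [hzero] at hz
        have hmem : a = b ∨ a = c := pvMem a b c hz
        rw [hcont2 x]
        by_cases hxa : x = a
        · subst hxa
          rcases hmem with h | h <;> simp [beq_iff_eq, h]
        · have hf : (x == a) = false := by simp [beq_iff_eq, hxa]
          simp [hf]
    have hu2 : du2.2 = (if b = c then 1 else 2 : Int) := by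
      by_cases hz : (d2.getD a 0 == 0) = true
      · rw [hdu2, if_pos hz]
        simp only []
        rw [hzero] at hz
        simp only [Bool.and_eq_true, Bool.not_eq_true', beq_eq_false_iff_ne, ne_eq] at hz
        rw [hu']
        exact pvSub a b c hz.1 hz.2
      · rw [hdu2, if_neg hz]
        simp only []
        rw [hzero] at hz
        have hmem : a = b ∨ a = c := pvMem a b c hz
        rw [hu']
        exact pvKeep a b c hmem
    -- apply the induction hypothesis with pre ++ [a]
    have hIH := ih (pre ++ [a]) b c
      (if du.2 == 3 then count + 1 else count) du2.2 du2.1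
      ((pre.length : Int) + 1) ((pre.length : Int) + 2 + 1)
      (((pre ++ a :: b :: c :: rest').length : Int))
      (by simp) (by ring) (by simp) hget2' hcont2' hu2
    rw [show (pre ++ [a]) ++ b :: c :: rest' = pre ++ a :: b :: c :: rest' from by simp] at hIH
    rw [hIH, hgood]
    rw [show pvTriples (a :: b :: c :: rest')
        = (if a != b && b != c && a != c then 1 else 0) + pvTriples (b :: c :: rest') from rfl]
    split <;> ring

-- A computes pvTriples
lemma pvA_eq (s : String) : countGoodSubstrings s = pvTriples s.toList := by
  unfold countGoodSubstrings
  match hcs : s.toList with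
  | [] =>
    rw [pvLoopA]
    rw [dif_neg (by norm_num)]
    rfl
  | [a] =>
    rw [pvLoopA]
    rw [dif_pos (by norm_num)]
    rw [show PySem.List.pyGet? [a] 0 = some a from by
      simp [PySem.List.pyGet?, PySem.List.pyIdx?]]
    simp only []
    rw [pvLoopA]
    rw [dif_neg (by norm_num)]
    rfl
  | a :: b :: rest =>
    -- iteration j = 0
    rw [pvLoopA]
    rw [dif_pos (by first | (simp; omega) | simp)]
    rw [PySem.List.pyGet?_zero_cons]
    simp only []
    -- iteration j = 1
    rw [pvLoopA]
    rw [dif_pos (by first | (simp; omega) | simp)]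
    rw [show PySem.List.pyGet? (a :: b :: rest) ((0 : Int) + 1) = some b from by
      rw [show ((0 : Int) + 1) = ((1 : Nat) : Int) from by norm_num, PySem.List.pyGet?_natCast]
      simp]
    simp only []
    -- now the steady state with pre = [], window [a, b]
    have h := pvLoopA_steady rest [] a b 0
      (if ((PySem.Dict.empty : PySem.Dict Char Int).insert a 1).contains b = false
        then (((PySem.Dict.empty : PySem.Dict Char Int).insert a 1).insert b 1, (2 : Int))
        else (((PySem.Dict.empty : PySem.Dict Char Int).insert a 1).modify b 0 (· + 1), (1 : Int))).2
      (if ((PySem.Dict.empty : PySem.Dict Char Int).insert a 1).contains b = false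
        then (((PySem.Dict.empty : PySem.Dict Char Int).insert a 1).insert b 1, (2 : Int))
        else (((PySem.Dict.empty : PySem.Dict Char Int).insert a 1).modify b 0 (· + 1), (1 : Int))).1
      0 2 ((rest.length : Int) + 1 + 1)
      (by simp) (by norm_num) (by simp)
      (by
        intro x
        by_cases hba : b = a
        · rw [if_neg (by simp [PySem.Dict.contains_insert, hba])]
          simp only []
          subst hba
          simp only [PySem.Dict.getD_modify, PySem.Dict.getD_insert, PySem.Dict.getD_empty]
          by_cases hxb : x = b
          · subst hxb; simp
          · simp [hxb]
        · rw [if_pos (by simp [PySem.Dict.contains_insert, PySem.Dict.contains_empty, hba])]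
          simp only []
          simp only [PySem.Dict.getD_insert, PySem.Dict.getD_empty]
          by_cases hxb : x = b
          · subst hxb
            simp [hba]
          · simp [hxb])
      (by
        intro x
        by_cases hba : b = a
        · rw [if_neg (by simp [PySem.Dict.contains_insert, hba])]
          simp only []
          subst hba
          rw [PySem.Dict.contains_modify, PySem.Dict.contains_insert]
          simp only [PySem.Dict.contains_empty]
          cases h1 : (x == b) <;> simp [h1]
        · rw [if_pos (by simp [PySem.Dict.contains_insert, PySem.Dict.contains_empty, hba])]
          simp only []
          rw [PySem.Dict.contains_insert, PySem.Dict.contains_insert]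
          simp only [PySem.Dict.contains_empty]
          cases h1 : (x == a) <;> cases h2 : (x == b) <;> simp [h1, h2])
      (by
        by_cases hba : b = a
        · rw [if_neg (by simp [PySem.Dict.contains_insert, hba])]
          subst hba
          simp
        · rw [if_pos (by simp [PySem.Dict.contains_insert, PySem.Dict.contains_empty, hba])]
          simp only []
          rw [if_neg (fun h => hba h.symm)])
    simpa using h

-- B computes pvTriples
lemma pvB_aux : ∀ (N : Nat) (cs : List Char) (k : Nat) (count : Int),
    cs.length - 2 - k = N →
    (PySem.List.pyRange (k : Int) ((cs.length : Int) - 2) 1).foldl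
      (fun count i =>
        if PySem.List.pyGetD cs i ' ' != PySem.List.pyGetD cs (i + 1) ' ' &&
           PySem.List.pyGetD cs (i + 1) ' ' != PySem.List.pyGetD cs (i + 2) ' ' &&
           PySem.List.pyGetD cs i ' ' != PySem.List.pyGetD cs (i + 2) ' '
        then count + 1 else count) count
      = count + pvTriples (cs.drop k) := by
  intro N
  induction N with
  | zero =>
    intro cs k count hN
    rw [PySem.List.pyRange_one_eq_nil (by omega)]
    rw [pvTriples_short _ (by simp; omega)]
    simp
  | succ N ih =>
    intro cs k count hN
    have hk2 : k + 2 < cs.length := by omega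
    rw [PySem.List.pyRange_one_cons (by omega : (k : Int) < (cs.length : Int) - 2)]
    rw [List.foldl_cons]
    have hg : ∀ (m : Nat) (hm : m < cs.length), PySem.List.pyGetD cs (m : Int) ' ' = cs[m]'hm := by
      intro m hm
      rw [PySem.List.pyGetD_of_nonneg cs ' ' (Int.natCast_nonneg m)]
      simp [List.getD_eq_getElem?_getD, List.getElem?_eq_getElem hm]
    have e1 : ((k : Int) + 1) = ((k + 1 : Nat) : Int) := by push_cast; ring
    have e2 : ((k : Int) + 2) = ((k + 2 : Nat) : Int) := by push_cast; ring
    rw [e1, e2, hg k (by omega), hg (k + 1) (by omega), hg (k + 2) (by omega)]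
    have hIH := ih cs (k + 1)
      (if cs[k]'(by omega) != cs[k + 1]'(by omega) && cs[k + 1]'(by omega) != cs[k + 2]'(by omega)
          && cs[k]'(by omega) != cs[k + 2]'(by omega)
        then count + 1 else count) (by omega)
    rw [hIH]
    rw [show cs.drop k = cs[k]'(by omega) :: cs[k + 1]'(by omega) :: cs[k + 2]'(by omega)
          :: cs.drop (k + 3) from by
      rw [List.drop_eq_getElem_cons (by omega), List.drop_eq_getElem_cons (by omega),
        List.drop_eq_getElem_cons (by omega)]]
    rw [show cs.drop (k + 1) = cs[k + 1]'(by omega) :: cs[k + 2]'(by omega) :: cs.drop (k + 3) from by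
      rw [List.drop_eq_getElem_cons (by omega), List.drop_eq_getElem_cons (by omega)]]
    rw [show pvTriples (cs[k]'(by omega) :: cs[k + 1]'(by omega) :: cs[k + 2]'(by omega)
          :: cs.drop (k + 3))
        = (if cs[k]'(by omega) != cs[k + 1]'(by omega) && cs[k + 1]'(by omega) != cs[k + 2]'(by omega)
              && cs[k]'(by omega) != cs[k + 2]'(by omega) then 1 else 0)
          + pvTriples (cs[k + 1]'(by omega) :: cs[k + 2]'(by omega) :: cs.drop (k + 3)) from rfl]
    split <;> ring

lemma pvB_eq (s : String) : countGoodSubstrings_alt s = pvTriples s.toList := by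
  unfold countGoodSubstrings_alt
  have h := pvB_aux (s.toList.length - 2) s.toList 0 0 rfl
  simpa using h

-- ===== VERDICT (by name: the statement is the Claim_ definition above) =====
theorem countGoodSubstrings_spec : Claim_equal_countGoodSubstrings := by
  intro s _
  unfold Spec_countGoodSubstrings
  rw [pvA_eq, pvB_eq]
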